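-- pv_equiv track=rewrite | github.com/yian-bian/python-code2 | to_unicode.py | raisedpos_to_binary
-- ===== SOURCE A (Python) =====
-- def raisedpos_to_binary(s):
--     ''' (str) -> str
--     Convert a string representing a braille character in raised-position
--     representation  into the binary representation.
--     >>> raisedpos_to_binary('')
--     '00000000'
--     >>> raisedpos_to_binary('142536')
--     '11111100'
--     >>> raisedpos_to_binary('14253678')
--     '11111111'
--     >>> raisedpos_to_binary('123')
--     '11100000'
--     >>> raisedpos_to_binary('125')
--     '11001000'
--     >>> raisedpos_to_binary('278')
--     '01000011'
--     '''
--     binary = "" # set a variable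
--     for i in range(1,9): # make i can be 1 to 8
--         if s.find(str(i)) != -1: # to see if there is digit‘i'in s
--             binary = binary+"1" # if there is, then put'1' at the same position
--         else:
--             binary = binary + "0"# if there is not, put '0'
--     return binary
-- ===== SOURCE B (Python) =====
-- def raisedpos_to_binary(s):
--     bits = ['0'] * 8
--     for c in s:
--         if '1' <= c <= '8':
--             bits[ord(c) - 49] = '1'
--     return ''.join(bits)
-- ===== Notes on version B (the rewrite author's own statement) =====
-- stated objective: alternative
-- what changed: Instead of scanning the string once per output position (eight find() passes), B makes a single pass over the string, scattering each digit character between one and eight into a position-indexed eight-slot array, then joins it.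
import Mathlib
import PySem

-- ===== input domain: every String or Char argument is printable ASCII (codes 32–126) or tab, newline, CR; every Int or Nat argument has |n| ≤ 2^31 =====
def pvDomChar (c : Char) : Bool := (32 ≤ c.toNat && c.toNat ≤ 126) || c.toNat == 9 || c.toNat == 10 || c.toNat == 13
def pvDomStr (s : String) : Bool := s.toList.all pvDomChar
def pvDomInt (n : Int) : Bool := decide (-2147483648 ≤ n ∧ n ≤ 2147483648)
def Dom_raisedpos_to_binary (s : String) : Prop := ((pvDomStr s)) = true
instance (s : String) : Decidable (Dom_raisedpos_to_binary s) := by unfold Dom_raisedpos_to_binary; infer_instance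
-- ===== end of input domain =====

-- B replaces A's eight find() scans of s by a single pass over s that scatters each
-- digit character '1'..'8' into a position-indexed 8-slot array (alternative decomposition).

-- ===== PORT A =====
def raisedpos_to_binary (s : String) : String :=
  String.mk ((PySem.List.pyRange 1 9 1).foldl
    (fun binary i =>
      if PySem.Str.find s (PySem.Int.toStr i) ≠ -1 then binary ++ ['1'] else binary ++ ['0'])
    [])

-- ===== PORT B =====
def raisedpos_to_binary_alt (s : String) : String :=
  String.mk (s.toList.foldl
    (fun bits c =>
      if '1' ≤ c ∧ c ≤ '8' then bits.set (c.toNat - 49) '1' else bits)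
    (List.replicate 8 '0'))

-- ===== PRECONDITION & SPEC =====
def Spec_raisedpos_to_binary (s : String) (out : String) : Prop := out = raisedpos_to_binary_alt s
instance (s : String) (out : String) : Decidable (Spec_raisedpos_to_binary s out) := by unfold Spec_raisedpos_to_binary; infer_instance

-- ===== CLAIM (what is proved, stated in full; the proofs are below) =====
def Claim_equal_raisedpos_to_binary : Prop := ∀ (s : String), Dom_raisedpos_to_binary s → Spec_raisedpos_to_binary s (raisedpos_to_binary s)

-- ===== LEMMAS AND PROOFS =====

-- B's loop step, named for the proofs (identical to the lambda in the port).
def altStep (bits : List Char) (c : Char) : List Char :=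
  if '1' ≤ c ∧ c ≤ '8' then bits.set (c.toNat - 49) '1' else bits

lemma altStep_length (bits : List Char) (c : Char) : (altStep bits c).length = bits.length := by
  unfold altStep; split_ifs <;> simp

lemma scatter_length (l : List Char) (arr : List Char) :
    (l.foldl altStep arr).length = arr.length := by
  induction l generalizing arr with
  | nil => rfl
  | cons c l ih => simp [List.foldl, ih, altStep_length]

lemma dchar_bounds (i : Nat) (hi : i < 8) :
    '1' ≤ Char.ofNat (49 + i) ∧ Char.ofNat (49 + i) ≤ '8' := by
  interval_cases i <;> exact ⟨by decide, by decide⟩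

lemma dchar_toNat (i : Nat) (hi : i < 8) : (Char.ofNat (49 + i)).toNat = 49 + i := by
  interval_cases i <;> decide

lemma digit_toNat_ge (c : Char) (h : '1' ≤ c) : 49 ≤ c.toNat := by
  rw [Char.le_def, UInt32.le_iff_toNat_le] at h; exact h

lemma digit_toNat_le (c : Char) (h : c ≤ '8') : c.toNat ≤ 56 := by
  rw [Char.le_def, UInt32.le_iff_toNat_le] at h; exact h

lemma scatter_getElem (l : List Char) (i : Nat) (hi : i < 8) :
    ∀ (arr : List Char) (h8 : arr.length = 8),
      (l.foldl altStep arr)[i]'(by rw [scatter_length, h8]; exact hi) =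
        if Char.ofNat (49 + i) ∈ l then '1' else arr[i]'(by rw [h8]; exact hi) := by
  induction l with
  | nil => intro arr h8; simp
  | cons c l ih =>
    intro arr h8
    have h8' : (altStep arr c).length = 8 := by rw [altStep_length, h8]
    have := ih (altStep arr c) h8'
    refine this.trans ?_
    by_cases hl : Char.ofNat (49 + i) ∈ l
    · simp [hl]
    · simp only [hl, if_false, List.mem_cons, or_false]
      by_cases hc : Char.ofNat (49 + i) = c
      · subst hc
        have hstep : altStep arr (Char.ofNat (49 + i)) = arr.set i '1' := by
          unfold altStep
          rw [if_pos (dchar_bounds i hi), dchar_toNat i hi, Nat.add_sub_cancel_left]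
        simp [hstep, List.getElem_set_self]
      · rw [if_neg hc]
        unfold altStep
        split_ifs with hg
        · have h1 := digit_toNat_ge c hg.1
          have h2 := digit_toNat_le c hg.2
          have hne : c.toNat - 49 ≠ i := by
            intro h
            apply hc
            have : c.toNat = 49 + i := by omega
            rw [← this, Char.ofNat_toNat]
          exact List.getElem_set_ne hne _
        · rfl

lemma cond_iff (s : String) (c : Char) (t : String) (ht : t.toList = [c]) :
    (PySem.Str.find s t ≠ -1) = (c ∈ s.toList) := by
  have h := PySem.Str.find_eq_neg_one_iff s t
  rw [ht] at h
  simp only [ne_eq, h, not_not, List.singleton_infix_iff]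

-- ===== VERDICT (by name: the statement is the Claim_ definition above) =====
theorem raisedpos_to_binary_spec : Claim_equal_raisedpos_to_binary := by
  intro s _
  unfold Spec_raisedpos_to_binary raisedpos_to_binary raisedpos_to_binary_alt
  have hr : PySem.List.pyRange 1 9 1 = [1, 2, 3, 4, 5, 6, 7, 8] := by decide
  have hfun : (fun (b : List Char) (i : Int) =>
      if PySem.Str.find s (PySem.Int.toStr i) ≠ -1 then b ++ ['1'] else b ++ ['0']) =
      fun b i => b ++ [if PySem.Str.find s (PySem.Int.toStr i) ≠ -1 then '1' else '0'] := by
    funext b i; split_ifs <;> rfl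
  rw [hr, hfun, PySem.List.foldl_append_singleton_eq_map, List.nil_append]
  congr 1
  have hfold : s.toList.foldl
      (fun bits c => if '1' ≤ c ∧ c ≤ '8' then bits.set (c.toNat - 49) '1' else bits)
      (List.replicate 8 '0') = s.toList.foldl altStep (List.replicate 8 '0') := rfl
  rw [hfold]
  apply List.ext_getElem
  · simp [scatter_length]
  · intro i hi1 hi2
    have hi : i < 8 := by simpa [scatter_length] using hi2
    rw [scatter_getElem s.toList i hi (List.replicate 8 '0') (by simp)]
    interval_cases i <;>
      simp only [List.getElem_map, List.getElem_cons_zero, List.getElem_cons_succ,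
        List.getElem_replicate,
        cond_iff s '1' (PySem.Int.toStr 1) (by decide), show Char.ofNat (49 + 0) = '1' from by decide,
        cond_iff s '2' (PySem.Int.toStr 2) (by decide), show Char.ofNat (49 + 1) = '2' from by decide,
        cond_iff s '3' (PySem.Int.toStr 3) (by decide), show Char.ofNat (49 + 2) = '3' from by decide,
        cond_iff s '4' (PySem.Int.toStr 4) (by decide), show Char.ofNat (49 + 3) = '4' from by decide,
        cond_iff s '5' (PySem.Int.toStr 5) (by decide), show Char.ofNat (49 + 4) = '5' from by decide,
        cond_iff s '6' (PySem.Int.toStr 6) (by decide), show Char.ofNat (49 + 5) = '6' from by decide,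
        cond_iff s '7' (PySem.Int.toStr 7) (by decide), show Char.ofNat (49 + 6) = '7' from by decide,
        cond_iff s '8' (PySem.Int.toStr 8) (by decide), show Char.ofNat (49 + 7) = '8' from by decide]
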